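-- pv_equiv track=rewrite | github.com/paulchan890130/hanwoory | backend/scripts/build_llm_chunks_v2.py | cluster_pages
-- ===== SOURCE A (Python) =====
-- def cluster_pages(pages: list[int], gap: int = 8) -> list[tuple[int, int]]:
--     if not pages: return []
--     pages = sorted(pages)
--     clusters = []; cur = [pages[0]]
--     for p in pages[1:]:
--         if p - cur[-1] > gap:
--             clusters.append((cur[0], cur[-1])); cur = [p]
--         else:
--             cur.append(p)
--     clusters.append((cur[0], cur[-1]))
--     return clusters
-- ===== SOURCE B (Python) =====
-- def cluster_pages(pages: list[int], gap: int = 8) -> list[tuple[int, int]]: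
--     # Two staged passes over the sorted pages: pass 1 collects the boundary
--     # indices where the gap is exceeded; pass 2 slices segments out by index.
--     ps = sorted(pages)
--     n = len(ps)
--     if n == 0:
--         return []
--     bounds = [0] + [i for i in range(1, n) if ps[i] - ps[i - 1] > gap] + [n]
--     return [(ps[s], ps[e - 1]) for s, e in zip(bounds, bounds[1:])]
-- ===== Notes on version B (the rewrite author's own statement) =====
-- stated objective: alternative
-- what changed: A makes one forward scan over the sorted pages carrying a growing current-cluster list and emitting a (first,last) pair at each big gap; B is two staged passes: a comprehension over indices first collects the boundary positions where the gap is exceeded, then a second pass over consecutive boundary pairs reads each cluster's endpoints off the sorted list by index.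
import Mathlib
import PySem

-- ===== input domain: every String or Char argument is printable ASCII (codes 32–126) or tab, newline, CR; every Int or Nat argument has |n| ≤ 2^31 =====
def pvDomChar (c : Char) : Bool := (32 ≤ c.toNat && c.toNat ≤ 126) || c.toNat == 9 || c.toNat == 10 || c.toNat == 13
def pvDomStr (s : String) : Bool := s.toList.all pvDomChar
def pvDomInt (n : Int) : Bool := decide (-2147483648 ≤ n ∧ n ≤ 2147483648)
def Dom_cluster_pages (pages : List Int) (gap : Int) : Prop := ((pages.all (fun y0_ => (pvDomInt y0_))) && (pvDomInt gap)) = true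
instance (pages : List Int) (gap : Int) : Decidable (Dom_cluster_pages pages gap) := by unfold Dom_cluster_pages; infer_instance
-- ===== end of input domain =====

-- B replaces A's single forward scan with a current-cluster accumulator by two staged
-- passes: collect the boundary indices where the gap is exceeded, then read each
-- segment's endpoints off the sorted list by index; objective: alternative (same cost).

-- ===== PORT A =====
-- A's loop over pages[1:]; `cur` is the Python list `cur`, which is nonempty throughout
-- (it starts as [pages[0]] and is only ever replaced by [p] or appended to), so
-- cur[0] = cur.headD 0 and cur[-1] = cur.getLastD 0 exactly.
def cpLoop (gap : Int) : List (Int × Int) → List Int → List Int → List (Int × Int)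
  | clusters, cur, [] => clusters ++ [(cur.headD 0, cur.getLastD 0)]
  | clusters, cur, p :: ps =>
      if p - cur.getLastD 0 > gap then
        cpLoop gap (clusters ++ [(cur.headD 0, cur.getLastD 0)]) [p] ps
      else
        cpLoop gap clusters (cur ++ [p]) ps

def cluster_pages (pages : List Int) (gap : Int) : List (Int × Int) :=
  if pages = [] then []
  else
    -- pages = sorted(pages); pages[0] / pages[1:] read off the nonempty sorted list
    match PySem.List.sorted pages (fun x => x) false with
    | [] => []
    | x :: rest => cpLoop gap [] [x] rest

-- ===== PORT B =====
-- pass 1 of Source B: bounds = [0] + [i for i in range(1, n) if ps[i] - ps[i-1] > gap] + [n]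
def cpBounds (gap : Int) (ps : List Int) : List Int :=
  0 :: (PySem.List.pyRange 1 (ps.length : Int) 1).filter
        (fun i => PySem.List.pyGetD ps i 0 - PySem.List.pyGetD ps (i - 1) 0 > gap)
    ++ [(ps.length : Int)]

-- pass 2 of Source B: [(ps[s], ps[e-1]) for s, e in zip(w, w[1:])]
def pairsMap (ps : List Int) (w : List Int) : List (Int × Int) :=
  (w.zip w.tail).map (fun se => (PySem.List.pyGetD ps se.1 0, PySem.List.pyGetD ps (se.2 - 1) 0))

def cpBody (gap : Int) (ps : List Int) : List (Int × Int) :=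
  pairsMap ps (cpBounds gap ps)

def cluster_pages_alt (pages : List Int) (gap : Int) : List (Int × Int) :=
  let ps := PySem.List.sorted pages (fun x => x) false
  if (ps.length : Int) = 0 then [] else cpBody gap ps

-- ===== PRECONDITION & SPEC =====
def Spec_cluster_pages (pages : List Int) (gap : Int) (out : List (Int × Int)) : Prop := out = cluster_pages_alt pages gap
instance (pages : List Int) (gap : Int) (out : List (Int × Int)) : Decidable (Spec_cluster_pages pages gap out) := by unfold Spec_cluster_pages; infer_instance

-- ===== CLAIM (what is proved, stated in full; the proofs are below) =====
def Claim_equal_cluster_pages : Prop := ∀ (pages : List Int) (gap : Int), Dom_cluster_pages pages gap → Spec_cluster_pages pages gap (cluster_pages pages gap)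

-- ===== LEMMAS AND PROOFS =====

-- what A's pending cluster (first f, last l) contributes in front of the clusters of the rest
def glue (gap f l : Int) : List (Int × Int) → List (Int × Int)
  | [] => [(f, l)]
  | (a, b) :: t => if a - l > gap then (f, l) :: (a, b) :: t else (f, b) :: t

-- the common recursive characterisation both ports are reduced to
def rAux (gap : Int) : List Int → List (Int × Int)
  | [] => []
  | x :: t => glue gap x x (rAux gap t)

theorem glue_head (gap x : Int) (r : List (Int × Int)) :
    ∃ b t, glue gap x x r = (x, b) :: t := by
  rcases r with _ | ⟨⟨a, c⟩, t⟩
  · exact ⟨x, [], rfl⟩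
  · simp only [glue]; split_ifs
    · exact ⟨x, (a, c) :: t, rfl⟩
    · exact ⟨c, t, rfl⟩

theorem cpLoop_eq (gap : Int) (rest : List Int) :
    ∀ (clusters : List (Int × Int)) (cur : List Int), cur ≠ [] →
      cpLoop gap clusters cur rest
        = clusters ++ glue gap (cur.headD 0) (cur.getLastD 0) (rAux gap rest) := by
  induction rest with
  | nil => intro clusters cur _; simp [cpLoop, rAux, glue]
  | cons p ps ih =>
    intro clusters cur hcur
    rcases cur with _ | ⟨f, cs⟩
    · exact absurd rfl hcur
    have hh : (f :: cs).headD 0 = f := rfl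
    simp only [cpLoop]
    by_cases hgap : p - (f :: cs).getLastD 0 > gap
    · rw [if_pos hgap, ih _ [p] (by simp)]
      obtain ⟨b, t, hbt⟩ := glue_head gap p (rAux gap ps)
      have hb : glue gap ([p].headD 0) ([p].getLastD 0) (rAux gap ps) = (p, b) :: t := by
        simpa using hbt
      rw [hb, show rAux gap (p :: ps) = glue gap p p (rAux gap ps) from rfl, hbt, hh]
      simp only [glue]
      rw [if_pos hgap]
      simp
    · rw [if_neg hgap, ih _ ((f :: cs) ++ [p]) (by simp)]
      have h1 : ((f :: cs) ++ [p]).headD 0 = f := by simp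
      have h2 : ((f :: cs) ++ [p]).getLastD 0 = p :=
        List.getLastD_concat
      rw [h1, h2, show rAux gap (p :: ps) = glue gap p p (rAux gap ps) from rfl, hh]
      set l := (f :: cs).getLastD 0 with hl
      have hgap' : p - l ≤ gap := by omega
      congr 1
      rcases hr : rAux gap ps with _ | ⟨⟨a, b⟩, t⟩
      · simp only [glue]
        rw [if_neg (by omega)]
      · simp only [glue]
        split_ifs <;> simp_all

-- pyGetD shifts across a cons for a nonnegative index
theorem pyGetD_cons_shift (a : Int) (s : List Int) (i : Int) (d : Int) (h : 0 ≤ i) :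
    PySem.List.pyGetD (a :: s) (i + 1) d = PySem.List.pyGetD s i d := by
  obtain ⟨k, rfl⟩ := Int.eq_ofNat_of_zero_le h
  have : ((k : Int) + 1) = ((k + 1 : Nat) : Int) := by push_cast; ring
  rw [this, PySem.List.pyGetD_natCast, PySem.List.pyGetD_natCast]
  rfl

-- adding 1 to every element of a range shifts the range
theorem pyRange_map_succ (a b : Int) :
    (PySem.List.pyRange a b 1).map (· + 1) = PySem.List.pyRange (a + 1) (b + 1) 1 := by
  rw [PySem.List.pyRange_one, PySem.List.pyRange_one]
  have : (b + 1 - (a + 1)).toNat = (b - a).toNat := by omega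
  rw [this, List.map_map]
  exact List.map_congr_left (fun k _ => by simp; ring)

-- peel the first boundary pair off pass 2
theorem pairsMap_cons (ps : List Int) (c : Int) (w : List Int) (hw : w ≠ []) :
    pairsMap ps (c :: w)
      = (PySem.List.pyGetD ps c 0, PySem.List.pyGetD ps (w.headD 0 - 1) 0) :: pairsMap ps w := by
  rcases w with _ | ⟨e, r⟩
  · exact absurd rfl hw
  · simp [pairsMap, List.zip]

-- pass 2 is shift-invariant: endpoint lookups over boundaries shifted by one equal
-- the same pass with the unshifted boundaries over the tail list
theorem pairsMap_shift (a : Int) (s : List Int) (w : List Int)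
    (h0 : ∀ u ∈ w, 0 ≤ u) (h1 : ∀ u ∈ w.tail, 1 ≤ u) :
    pairsMap (a :: s) (w.map (· + 1)) = pairsMap s w := by
  unfold pairsMap
  have htail : (w.map (· + 1)).tail = w.tail.map (· + 1) := by
    cases w <;> rfl
  rw [htail, List.zip_map, List.map_map]
  refine List.map_congr_left (fun p hp => ?_)
  obtain ⟨hp1, hp2⟩ := List.of_mem_zip hp
  have hs : 0 ≤ p.1 := h0 _ hp1
  have he : 1 ≤ p.2 := h1 _ hp2
  simp only [Function.comp, Prod.map]
  have h2 : p.2 + 1 - 1 = (p.2 - 1) + 1 := by ring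
  rw [pyGetD_cons_shift a s p.1 0 hs, h2, pyGetD_cons_shift a s (p.2 - 1) 0 (by omega)]

-- B's body satisfies the same peel-the-head recursion as A's scan
theorem cpBody_cons (gap x y : Int) (t : List Int) :
    cpBody gap (x :: y :: t) = glue gap x x (cpBody gap (y :: t)) := by
  set m : Int := ((y :: t).length : Int) with hm
  have hm1 : (1 : Int) ≤ m := by rw [hm]; simp
  set fb := (PySem.List.pyRange 1 m 1).filter
      (fun i => PySem.List.pyGetD (y :: t) i 0 - PySem.List.pyGetD (y :: t) (i - 1) 0 > gap)
    with hfb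
  have hnlen : (((x :: y :: t).length : Int)) = m + 1 := by
    rw [hm]; push_cast [List.length_cons]; ring
  -- bounds of the short list
  have hboundsS : cpBounds gap (y :: t) = 0 :: (fb ++ [m]) := by
    unfold cpBounds; rw [← hm, ← hfb]; simp
  -- split the long range and shift its remainder
  have hsplit : PySem.List.pyRange 1 (m + 1) 1 = 1 :: (PySem.List.pyRange 1 m 1).map (· + 1) := by
    rw [PySem.List.pyRange_one_cons (by omega), pyRange_map_succ]
  -- the boundary filter of the long list decomposes
  have ha : PySem.List.pyGetD (x :: y :: t) 1 0 = y := by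
    rw [show (1 : Int) = ((1 : Nat) : Int) from rfl, PySem.List.pyGetD_natCast]; rfl
  have hb : PySem.List.pyGetD (x :: y :: t) (1 - 1) 0 = x := by
    norm_num [PySem.List.pyGetD_zero_cons]
  have hshiftfilter : ((PySem.List.pyRange 1 m 1).map (· + 1)).filter
        (fun i => PySem.List.pyGetD (x :: y :: t) i 0 - PySem.List.pyGetD (x :: y :: t) (i - 1) 0 > gap)
      = fb.map (· + 1) := by
    rw [List.filter_map, hfb]
    congr 1
    refine List.filter_congr (fun i hi => ?_)
    have hi1 : 1 ≤ i := ((PySem.List.mem_pyRange_one).1 hi).1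
    have e1 : PySem.List.pyGetD (x :: y :: t) (i + 1) 0 = PySem.List.pyGetD (y :: t) i 0 :=
      pyGetD_cons_shift x (y :: t) i 0 (by omega)
    have e2 : PySem.List.pyGetD (x :: y :: t) (i + 1 - 1) 0 = PySem.List.pyGetD (y :: t) (i - 1) 0 := by
      rw [show i + 1 - 1 = (i - 1) + 1 by ring, pyGetD_cons_shift x (y :: t) (i - 1) 0 (by omega)]
    simp only [Function.comp]
    rw [e1, e2]
  have hfilter : (PySem.List.pyRange 1 (m + 1) 1).filter
        (fun i => PySem.List.pyGetD (x :: y :: t) i 0 - PySem.List.pyGetD (x :: y :: t) (i - 1) 0 > gap)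
      = (if y - x > gap then [(1 : Int)] else []) ++ fb.map (· + 1) := by
    rw [hsplit]
    simp only [List.filter_cons]
    rw [ha, hb, hshiftfilter]
    by_cases h : y - x > gap <;> simp [h]
  have hboundsL : cpBounds gap (x :: y :: t)
      = 0 :: ((if y - x > gap then [(1 : Int)] else []) ++ fb.map (· + 1)) ++ [m + 1] := by
    unfold cpBounds; rw [hnlen, hfilter]
  -- boundary values are ≥ 1
  have hwt1 : ∀ u ∈ fb ++ [m], 1 ≤ u := by
    intro u hu; rcases List.mem_append.1 hu with h | h
    · exact ((PySem.List.mem_pyRange_one).1 (List.mem_of_mem_filter (hfb ▸ h))).1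
    · simp at h; omega
  obtain ⟨e, r', hfbm⟩ : ∃ e r', fb ++ [m] = e :: r' := by
    rcases h : fb ++ [m] with _ | ⟨e, r'⟩
    · exact absurd h (by simp)
    · exact ⟨e, r', rfl⟩
  have he1 : 1 ≤ e := hwt1 e (by rw [hfbm]; exact List.mem_cons_self ..)
  -- B's body of the short list, with its head cluster explicit
  have hbodyS : cpBody gap (y :: t)
      = (y, PySem.List.pyGetD (y :: t) (e - 1) 0) :: pairsMap (y :: t) (e :: r') := by
    show pairsMap (y :: t) (cpBounds gap (y :: t)) = _
    rw [hboundsS, hfbm, pairsMap_cons (y :: t) 0 (e :: r') (by simp),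
        PySem.List.pyGetD_zero_cons]
    rfl
  show pairsMap (x :: y :: t) (cpBounds gap (x :: y :: t)) = glue gap x x (cpBody gap (y :: t))
  by_cases hgap : y - x > gap
  · -- new cluster at the head
    have hbounds : cpBounds gap (x :: y :: t) = 0 :: ((0 :: (fb ++ [m])).map (· + 1)) := by
      rw [hboundsL, if_pos hgap]; simp
    rw [hbounds, hfbm, List.map_cons,
        pairsMap_cons (x :: y :: t) 0 ((0 + 1) :: ((e :: r').map (· + 1))) (by simp),
        show ((0 + 1 : Int) :: ((e :: r').map (· + 1))) = (0 :: e :: r').map (· + 1) from rfl,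
        pairsMap_shift x (y :: t) (0 :: e :: r')
          (by intro u hu
              rcases List.mem_cons.1 hu with h' | h'
              · omega
              · have := hwt1 u (by rw [hfbm]; exact h'); omega)
          (by intro u hu; exact hwt1 u (by rw [hfbm]; exact hu))]
    rw [hbodyS]
    simp only [glue]
    rw [if_pos (by omega)]
    rw [show pairsMap (y :: t) (0 :: e :: r') = cpBody gap (y :: t) from by
          rw [hbodyS]
          rw [pairsMap_cons (y :: t) 0 (e :: r') (by simp), PySem.List.pyGetD_zero_cons]
          rfl]
    rw [hbodyS]
    norm_num [PySem.List.pyGetD_zero_cons]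
  · -- merge the head into the first cluster
    have hbounds : cpBounds gap (x :: y :: t) = 0 :: ((fb ++ [m]).map (· + 1)) := by
      rw [hboundsL, if_neg hgap]; simp
    rw [hbounds, hfbm, List.map_cons,
        pairsMap_cons (x :: y :: t) 0 ((e + 1) :: (r'.map (· + 1))) (by simp),
        show ((e + 1 : Int) :: (r'.map (· + 1))) = (e :: r').map (· + 1) from rfl,
        pairsMap_shift x (y :: t) (e :: r')
          (by intro u hu
              have := hwt1 u (by rw [hfbm]; exact hu); omega)
          (by intro u hu; exact hwt1 u (by rw [hfbm]; exact List.mem_of_mem_tail hu))]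
    rw [hbodyS]
    simp only [glue]
    rw [if_neg (by omega)]
    have hhd : (((e :: r').map (· + 1)).headD 0) = e + 1 := by simp
    rw [hhd, show e + 1 - 1 = (e - 1) + 1 by ring,
        pyGetD_cons_shift x (y :: t) (e - 1) 0 (by omega), PySem.List.pyGetD_zero_cons]

theorem cpBody_single (gap x : Int) : cpBody gap [x] = [(x, x)] := by
  unfold cpBody cpBounds
  rw [show (([x] : List Int).length : Int) = 1 by simp, PySem.List.pyRange_one_eq_nil le_rfl]
  simp [pairsMap, List.zip, PySem.List.pyGetD_zero_cons]

theorem cpBody_eq_rAux (gap : Int) (l : List Int) (h : l ≠ []) :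
    cpBody gap l = rAux gap l := by
  induction l with
  | nil => exact absurd rfl h
  | cons x t ih =>
    rcases t with _ | ⟨y, t'⟩
    · rw [cpBody_single]; rfl
    · rw [cpBody_cons, ih (by simp)]; rfl

-- ===== VERDICT (by name: the statement is the Claim_ definition above) =====
theorem cluster_pages_spec : Claim_equal_cluster_pages := by
  intro pages gap _
  unfold Spec_cluster_pages cluster_pages cluster_pages_alt
  by_cases hp : pages = []
  · subst hp
    simp [PySem.List.sorted]
  · rw [if_neg hp]
    have hs : PySem.List.sorted pages (fun x => x) false ≠ [] := by
      simpa [PySem.List.sorted_eq_nil_iff] using hp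
    rcases h : PySem.List.sorted pages (fun x => x) false with _ | ⟨x, rest⟩
    · exact absurd h hs
    rw [if_neg (by simp only [List.length_cons]; push_cast; omega), cpBody_eq_rAux gap (x :: rest) (by simp)]
    show cpLoop gap [] [x] rest = rAux gap (x :: rest)
    rw [cpLoop_eq gap rest [] [x] (by simp)]
    simp [rAux]
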